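-- pv_equiv track=rewrite | github.com/elzup/shortcodes | super_cup.py | SuperCup
-- ===== SOURCE A (Python) =====
-- def SuperCup(s):
--     a, b = "zamalek", "alahly"
--     for c in s:
--         if a[0] == c:
--             a = a[1:]
--         if b[0] == c:
--             b = b[1:]
--         if a == "":
--             return "win"
--         if b == "":
--             return "loss"
-- ===== SOURCE B (Python) =====
-- def _complete_index(s, word):
--     """0-based index at which word is first completed as a subsequence of s, or None."""
--     j = 0
--     for i, c in enumerate(s):
--         if c == word[j]:
--             j += 1
--             if j == len(word):
--                 return i
--     return None
--
--
-- def SuperCup(s):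
--     win = _complete_index(s, "zamalek")
--     loss = _complete_index(s, "alahly")
--     if win is None and loss is None:
--         return None
--     if loss is None:
--         return "win"
--     if win is None:
--         return "loss"
--     return "win" if win <= loss else "loss"
-- ===== Notes on version B (the rewrite author's own statement) =====
-- stated objective: alternative
-- what changed: Replaces the single interleaved loop that trims both team words simultaneously with two independent one-pass subsequence-completion scans (one per word) followed by an index comparison (win on ties).
import Mathlib
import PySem

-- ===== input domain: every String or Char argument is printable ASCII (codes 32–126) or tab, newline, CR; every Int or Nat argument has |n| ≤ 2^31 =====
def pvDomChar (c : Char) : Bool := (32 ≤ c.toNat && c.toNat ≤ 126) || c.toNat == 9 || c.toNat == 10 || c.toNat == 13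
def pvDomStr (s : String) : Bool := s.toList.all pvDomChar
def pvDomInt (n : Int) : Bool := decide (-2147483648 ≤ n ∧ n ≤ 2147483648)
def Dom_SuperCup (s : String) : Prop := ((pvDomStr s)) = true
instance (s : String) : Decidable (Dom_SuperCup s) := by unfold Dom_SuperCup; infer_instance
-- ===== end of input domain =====

-- B replaces A's single interleaved trimming loop with two independent subsequence-completion
-- scans (one per team word) followed by an index comparison (win on ties); same behaviour, alternative decomposition.


-- ===== PORT A =====
-- Loop over s, trimming both remaining words; return as soon as one empties (win checked first).
-- (a and b are nonempty whenever the loop body runs, so head? = some c is exactly Python's a[0] == c.)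
def SuperCupLoop : List Char → List Char → List Char → Option String
  | [], _, _ => none
  | c :: rest, a, b =>
    let a' := if a.head? = some c then a.tail else a
    let b' := if b.head? = some c then b.tail else b
    if a' = [] then some "win"
    else if b' = [] then some "loss"
    else SuperCupLoop rest a' b'

def SuperCup (s : String) : Option String :=
  SuperCupLoop s.toList "zamalek".toList "alahly".toList

-- ===== PORT B =====
-- 0-based index at which w is first completed as a subsequence of s (none if never).
def completeIndex : List Char → List Char → Nat → Option Nat
  | [], _, _ => none
  | c :: rest, w, i =>
    if w.head? = some c then
      if w.tail = [] then some i else completeIndex rest w.tail (i + 1)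
    else completeIndex rest w (i + 1)

def SuperCup_alt (s : String) : Option String :=
  let win := completeIndex s.toList "zamalek".toList 0
  let loss := completeIndex s.toList "alahly".toList 0
  match win, loss with
  | none, none => none
  | _, none => some "win"
  | none, some _ => some "loss"
  | some w, some l => if w ≤ l then some "win" else some "loss"

-- ===== PRECONDITION & SPEC =====
def Spec_SuperCup (s : String) (out : Option String) : Prop := out = SuperCup_alt s
instance (s : String) (out : Option String) : Decidable (Spec_SuperCup s out) := by unfold Spec_SuperCup; infer_instance

-- ===== CLAIM (what is proved, stated in full; the proofs are below) =====
def Claim_equal_SuperCup : Prop := ∀ (s : String), Dom_SuperCup s → Spec_SuperCup s (SuperCup s)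

-- ===== LEMMAS AND PROOFS =====

def pvCombine : Option Nat → Option Nat → Option String
  | none, none => none
  | some _, none => some "win"
  | none, some _ => some "loss"
  | some w, some l => if w ≤ l then some "win" else some "loss"

theorem completeIndex_ge (s : List Char) : ∀ (w : List Char) (i j : Nat),
    completeIndex s w i = some j → i ≤ j := by
  induction s with
  | nil => intro w i j h; simp [completeIndex] at h
  | cons c rest ih =>
    intro w i j h
    simp only [completeIndex] at h
    split at h
    · split at h
      · simp at h; omega
      · exact Nat.le_of_succ_le (ih _ _ _ h)
    · exact Nat.le_of_succ_le (ih _ _ _ h)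

theorem SuperCupLoop_eq (s : List Char) : ∀ (a b : List Char) (i : Nat),
    a ≠ [] → b ≠ [] →
    SuperCupLoop s a b = pvCombine (completeIndex s a i) (completeIndex s b i) := by
  induction s with
  | nil => intro a b i _ _; simp [SuperCupLoop, completeIndex, pvCombine]
  | cons c rest ih =>
    intro a b i ha hb
    simp only [SuperCupLoop, completeIndex]
    by_cases hac : a.head? = some c
    · by_cases hat : a.tail = []
      · -- a completes here: result "win"; combine (some i) anything = "win" since other index ≥ i
        simp only [hac, hat, if_true, if_false, eq_self_iff_true]
        by_cases hbc : b.head? = some c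
        · by_cases hbt : b.tail = []
          · simp [hbc, hbt, pvCombine]
          · simp only [hbc, hbt, if_true, if_false, eq_self_iff_true]
            cases h : completeIndex rest b.tail (i + 1) with
            | none => simp [pvCombine]
            | some j =>
              have := completeIndex_ge rest b.tail (i+1) j h
              simp [pvCombine]; omega
        · simp only [hbc, if_true, if_false]
          cases h : completeIndex rest b (i + 1) with
          | none => simp [pvCombine]
          | some j =>
            have := completeIndex_ge rest b (i+1) j h
            simp [pvCombine]; omega
      · -- a matched but does not complete
        simp only [hac, if_true, eq_self_iff_true]
        rw [if_neg hat, if_neg hat]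
        by_cases hbc : b.head? = some c
        · by_cases hbt : b.tail = []
          · -- b completes here: "loss"; a's index (if any) > i
            simp only [hbc, hbt, if_true, eq_self_iff_true]
            cases h : completeIndex rest a.tail (i + 1) with
            | none => simp [pvCombine]
            | some j =>
              have := completeIndex_ge rest a.tail (i+1) j h
              simp [pvCombine]; omega
          · simp only [hbc, if_true, eq_self_iff_true]
            rw [if_neg hbt, if_neg hbt]
            exact ih a.tail b.tail (i+1) hat hbt
        · simp only [hbc, if_true, if_false]
          rw [if_neg hb]
          exact ih a.tail b (i+1) hat hb
    · simp only [hac, if_true, if_false]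
      rw [if_neg ha]
      by_cases hbc : b.head? = some c
      · by_cases hbt : b.tail = []
        · simp only [hbc, hbt, if_true, eq_self_iff_true]
          cases h : completeIndex rest a (i + 1) with
          | none => simp [pvCombine]
          | some j =>
            have := completeIndex_ge rest a (i+1) j h
            simp [pvCombine]; omega
        · simp only [hbc, if_true, eq_self_iff_true]
          rw [if_neg hbt, if_neg hbt]
          exact ih a b.tail (i+1) ha hbt
      · simp only [hbc, if_true, if_false]
        rw [if_neg hb]
        exact ih a b (i+1) ha hb

theorem SuperCup_alt_eq_combine (s : String) :
    SuperCup_alt s = pvCombine (completeIndex s.toList "zamalek".toList 0)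
                               (completeIndex s.toList "alahly".toList 0) := by
  unfold SuperCup_alt
  cases completeIndex s.toList "zamalek".toList 0 <;>
    cases completeIndex s.toList "alahly".toList 0 <;> simp [pvCombine]

-- ===== VERDICT (by name: the statement is the Claim_ definition above) =====
theorem SuperCup_spec : Claim_equal_SuperCup := by
  intro s _
  unfold Spec_SuperCup SuperCup
  rw [SuperCup_alt_eq_combine]
  exact SuperCupLoop_eq s.toList _ _ 0 (by decide) (by decide)
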